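-- pv_equiv track=rewrite | github.com/dalmacsernok/The-Keymaker | keymaker.py | get_square_index_chars
-- ===== SOURCE A (Python) =====
-- def get_square_index_chars(word):
--     result = ""
--     word_letters = []
--     for character in word:
--         word_letters.append(character)
--     for i in range(len(word_letters)):
--         for j in range(len(word_letters)):
--             if i == j ** 2:
--                 result += word[i]
--     return result
-- ===== SOURCE B (Python) =====
-- def get_square_index_chars(word):
--     res = []
--     k = 0
--     while k * k < len(word):
--         res.append(word[k * k])
--         k += 1
--     return "".join(res)
-- ===== Notes on version B (the rewrite author's own statement) =====
-- stated objective: faster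
-- what changed: Instead of scanning all index pairs (i,j) and testing i == j**2, B walks k = 0,1,2,... directly over the perfect-square indices k*k < len(word), collecting word[k*k].
import Mathlib
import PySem

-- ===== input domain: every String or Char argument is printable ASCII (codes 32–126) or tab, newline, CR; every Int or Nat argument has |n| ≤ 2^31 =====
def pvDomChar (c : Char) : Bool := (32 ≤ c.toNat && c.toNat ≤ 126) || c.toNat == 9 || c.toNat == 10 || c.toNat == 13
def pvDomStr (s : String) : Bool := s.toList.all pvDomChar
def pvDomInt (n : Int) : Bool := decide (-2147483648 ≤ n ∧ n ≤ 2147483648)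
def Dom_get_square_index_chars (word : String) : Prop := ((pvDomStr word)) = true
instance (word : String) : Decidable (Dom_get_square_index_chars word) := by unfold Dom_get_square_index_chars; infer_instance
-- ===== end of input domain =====

-- B replaces A's double scan over all index pairs (i, j) by stepping k = 0, 1, 2, … directly
-- through the perfect-square indices k*k < len(word); objective: faster.

-- ===== PORT A =====
-- literal transliteration of A; word[i] via PySem.List.pyGet? on word.toList (exact: here i is
-- always in range, since i < len(word), so the Option is always some and Python never raises).
def get_square_index_chars (word : String) : String :=
  let word_letters : List Char := word.toList.foldl (fun acc c => acc ++ [c]) []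
  let n : Int := word_letters.length
  let res : List Char :=
    (PySem.List.pyRange 0 n 1).foldl (fun result i =>
      (PySem.List.pyRange 0 n 1).foldl (fun r j =>
        if i = j * j then r ++ (PySem.List.pyGet? word.toList i).toList else r) result) []
  String.mk res

-- ===== PORT B =====
-- the while loop 'while k*k < len(word): res.append(word[k*k]); k += 1' as structural recursion
def pvAltLoop (cs : List Char) (k : Nat) : List Char :=
  if h : k * k < cs.length then cs[k * k] :: pvAltLoop cs (k + 1) else []
termination_by cs.length - k * k
decreasing_by
  have h2 : k * k < (k + 1) * (k + 1) := by nlinarith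
  omega

def get_square_index_chars_alt (word : String) : String :=
  String.mk (pvAltLoop word.toList 0)

-- ===== PRECONDITION & SPEC =====
def Spec_get_square_index_chars (word : String) (out : String) : Prop := out = get_square_index_chars_alt word
instance (word : String) (out : String) : Decidable (Spec_get_square_index_chars word out) := by unfold Spec_get_square_index_chars; infer_instance

-- ===== CLAIM (what is proved, stated in full; the proofs are below) =====
def Claim_equal_get_square_index_chars : Prop := ∀ (word : String), Dom_get_square_index_chars word → Spec_get_square_index_chars word (get_square_index_chars word)

-- ===== LEMMAS AND PROOFS =====

theorem pv_sqrt_mul_self (k : Nat) : Nat.sqrt (k * k) = k := by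
  rw [← Nat.pow_two, Nat.sqrt_eq']

-- a square i greater than k*k is at least (k+1)*(k+1)
theorem pv_sq_step {i k : Nat} (hsq : Nat.sqrt i * Nat.sqrt i = i) (h : k * k < i) :
    (k + 1) * (k + 1) ≤ i := by
  have hk : k < Nat.sqrt i := by
    by_contra hle
    have hle' : Nat.sqrt i ≤ k := by omega
    have := Nat.mul_le_mul hle' hle'
    omega
  calc (k + 1) * (k + 1) ≤ Nat.sqrt i * Nat.sqrt i := Nat.mul_le_mul hk hk
    _ = i := hsq

-- shifting the lower bound in the filtered list of square indices
theorem pv_filter_shift (n k : Nat) :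
    (List.range n).filter (fun i => decide (Nat.sqrt i * Nat.sqrt i = i) && decide (k * k ≤ i)) =
      if k * k < n then
        k * k :: (List.range n).filter
          (fun i => decide (Nat.sqrt i * Nat.sqrt i = i) && decide ((k + 1) * (k + 1) ≤ i))
      else [] := by
  induction n with
  | zero => simp
  | succ n ih =>
    rw [List.range_succ, List.filter_append, List.filter_append, ih]
    by_cases h1 : k * k < n
    · -- head already produced by ih
      have h2 : k * k < n + 1 := by omega
      simp only [h1, if_true, h2, if_true, List.filter_singleton]
      by_cases hsq : Nat.sqrt n * Nat.sqrt n = n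
      · have hstep : (k + 1) * (k + 1) ≤ n := pv_sq_step hsq h1
        simp [hsq, hstep, Nat.le_of_lt h1]
      · simp [hsq]
    · by_cases h2 : k * k = n
      · -- n itself is the square k*k; nothing smaller qualifies on the left,
        -- nothing at all on the right
        have hstep : k * k < (k + 1) * (k + 1) := by nlinarith
        have hsq : Nat.sqrt n * Nat.sqrt n = n := by rw [← h2, pv_sqrt_mul_self]
        have h3 : k * k < n + 1 := by omega
        have hnle : ¬ ((k + 1) * (k + 1) ≤ n) := by omega
        have e2 : (List.range n).filter
            (fun i => decide (Nat.sqrt i * Nat.sqrt i = i) && decide ((k + 1) * (k + 1) ≤ i)) = [] := by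
          rw [List.filter_eq_nil_iff]
          intro i hi
          have : i < n := List.mem_range.mp hi
          simp only [Bool.and_eq_true, decide_eq_true_eq, not_and]
          intro _; omega
        rw [if_neg h1, if_pos h3, e2]
        simp only [List.filter_singleton, List.nil_append]
        simp [hsq, hnle, h2]
      · -- k*k > n: nothing qualifies on either side
        have h3 : ¬ k * k < n + 1 := by omega
        simp only [h1, if_false, h3, if_false, List.nil_append, List.filter_singleton]
        have : ¬ k * k ≤ n := by omega
        simp [this]

-- characterisation of B's loop
theorem pv_altLoop_eq (cs : List Char) (k : Nat) :
    pvAltLoop cs k =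
      ((List.range cs.length).filter
        (fun i => decide (Nat.sqrt i * Nat.sqrt i = i) && decide (k * k ≤ i))).map
        (fun i => cs.getD i default) := by
  rw [pv_filter_shift]
  by_cases h : k * k < cs.length
  · rw [pvAltLoop.eq_def]
    simp only [h, dif_pos, if_pos, List.map_cons]
    rw [pv_altLoop_eq cs (k + 1)]
    congr 1
    rw [List.getD_eq_getElem cs default h]
  · rw [pvAltLoop.eq_def]
    simp [h]
termination_by cs.length - k * k
decreasing_by
  have h2 : k * k < (k + 1) * (k + 1) := by nlinarith
  omega

-- the inner j-loop of A finds exactly the (unique) square root of i, if it lies in range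
theorem pv_filter_root (i n : Nat) :
    (List.range n).filter (fun j => decide (i = j * j)) =
      if Nat.sqrt i * Nat.sqrt i = i ∧ Nat.sqrt i < n then [Nat.sqrt i] else [] := by
  induction n with
  | zero => simp
  | succ n ih =>
    rw [List.range_succ, List.filter_append, ih, List.filter_singleton]
    by_cases hin : i = n * n
    · have hs : Nat.sqrt i = n := by rw [hin, pv_sqrt_mul_self]
      have hsq : Nat.sqrt i * Nat.sqrt i = i := by rw [hs, ← hin]
      have h1 : ¬ (Nat.sqrt i * Nat.sqrt i = i ∧ Nat.sqrt i < n) := by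
        intro h; omega
      have h2 : Nat.sqrt i * Nat.sqrt i = i ∧ Nat.sqrt i < n + 1 := ⟨hsq, by omega⟩
      simp [hin]
    · have hne : ¬ (i = n * n) := hin
      by_cases hsq : Nat.sqrt i * Nat.sqrt i = i
      · have hsn : Nat.sqrt i ≠ n := by
          intro h; apply hne; rw [← hsq, h]
        by_cases hlt : Nat.sqrt i < n
        · have h4 : Nat.sqrt i * Nat.sqrt i = i ∧ Nat.sqrt i < n := ⟨hsq, hlt⟩
          have h5 : Nat.sqrt i * Nat.sqrt i = i ∧ Nat.sqrt i < n + 1 := ⟨hsq, by omega⟩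
          simp [h4, h5, hne]
        · have h4 : ¬ (Nat.sqrt i * Nat.sqrt i = i ∧ Nat.sqrt i < n) := fun h => hlt h.2
          simp [h4, hne]
          intro _
          omega
      · have h4 : ¬ (Nat.sqrt i * Nat.sqrt i = i ∧ Nat.sqrt i < n) := fun h => hsq h.1
        simp [h4, hne]
        intro h
        exact absurd h hsq
-- generic: flatMap of an if-singleton is filter-then-map
theorem pv_flatMap_if {α β : Type} (q : α → Prop) [DecidablePred q] (f : α → β) (l : List α) :
    l.flatMap (fun x => if q x then [f x] else []) =
      (l.filter (fun x => decide (q x))).map f := by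
  induction l with
  | nil => rfl
  | cons a l ih =>
    by_cases h : q a <;> simp [List.flatMap_cons, h, ih]

-- characterisation of A's nested loops
theorem pv_A_eq (cs : List Char) :
    (PySem.List.pyRange 0 (cs.length : Int) 1).foldl (fun result i =>
      (PySem.List.pyRange 0 (cs.length : Int) 1).foldl (fun r j =>
        if i = j * j then r ++ (PySem.List.pyGet? cs i).toList else r) result) [] =
    ((List.range cs.length).filter
      (fun i => decide (Nat.sqrt i * Nat.sqrt i = i))).map (fun i => cs.getD i default) := by
  rw [PySem.List.pyRange_zero_natCast, List.foldl_map]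
  rw [PySem.List.foldl_congr_mem (List.range cs.length) _
      (fun result i' => result ++ (if Nat.sqrt i' * Nat.sqrt i' = i' then [cs.getD i' default] else [])) []
      ?_]
  · rw [PySem.List.foldl_append_eq_flatMap,
        pv_flatMap_if (fun i => Nat.sqrt i * Nat.sqrt i = i) (fun i => cs.getD i default)]
    simp
  · intro acc i' hi'
    have hi : i' < cs.length := List.mem_range.mp hi'
    rw [List.foldl_map]
    have hc : (PySem.List.pyGet? cs (i' : Nat)).toList = [cs.getD i' default] := by
      simp [PySem.List.pyGet?, PySem.List.pyIdx?, hi]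
    have hfun : (fun (r : List Char) (j : Nat) =>
          if ((i' : Nat) : Int) = ((j : Nat) : Int) * ((j : Nat) : Int)
          then r ++ (PySem.List.pyGet? cs (i' : Nat)).toList else r) =
        (fun (r : List Char) (j : Nat) =>
          if (fun j => decide (i' = j * j)) j = true then r ++ [(fun _ => cs.getD i' default) j] else r) := by
      funext r j
      rw [hc]
      have : (((i' : Nat) : Int) = ((j : Nat) : Int) * ((j : Nat) : Int)) ↔ (i' = j * j) := by
        constructor
        · intro h; exact_mod_cast h
        · intro h; exact_mod_cast h
      simp [this]
    rw [hfun, PySem.List.foldl_append_if, pv_filter_root]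
    by_cases hsq : Nat.sqrt i' * Nat.sqrt i' = i'
    · have hlt : Nat.sqrt i' < cs.length :=
        Nat.lt_of_le_of_lt (Nat.sqrt_le_self i') hi
      simp [hsq, hlt]
    · simp [hsq]

-- ===== VERDICT (by name: the statement is the Claim_ definition above) =====
theorem get_square_index_chars_spec : Claim_equal_get_square_index_chars := by
  intro word _
  unfold Spec_get_square_index_chars get_square_index_chars get_square_index_chars_alt
  simp only [PySem.List.foldl_append_singleton_eq_self, List.nil_append]
  rw [pv_A_eq word.toList, pv_altLoop_eq word.toList 0]
  congr 1
  congr 1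
  apply List.filter_congr
  intro i _
  simp
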